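-- pv_equiv track=rewrite | github.com/ManX-Anon/websecv | scanner/repeater/repeater.py | _diff_headers
-- ===== SOURCE A (Python) =====
-- from typing import List, Optional, Dict, Any
--
-- def _diff_headers(headers1: Dict[str, str], headers2: Dict[str, str]) -> Dict[str, tuple]:
--     """Find differences in headers"""
--     diff = {}
--     all_keys = set(headers1.keys()) | set(headers2.keys())
--
--     for key in all_keys:
--         val1 = headers1.get(key)
--         val2 = headers2.get(key)
--         if val1 != val2:
--             diff[key] = (val1, val2)
--
--     return diff
-- ===== SOURCE B (Python) =====
-- def _diff_headers(headers1, headers2):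
--     """Find differences in headers (two direct passes, no materialized key union)."""
--     diff = {}
--     for key, v1 in headers1.items():
--         v2 = headers2.get(key)
--         if v2 != v1:
--             diff[key] = (v1, v2)
--     for key, v2 in headers2.items():
--         if key not in headers1:
--             diff[key] = (None, v2)
--     return diff
-- ===== Notes on version B (the rewrite author's own statement) =====
-- stated objective: alternative
-- what changed: Replaces the materialized union of key sets with two direct passes: one over headers1.items() comparing against headers2.get, one over headers2.items() for keys absent from headers1; no set is built.
import Mathlib
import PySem

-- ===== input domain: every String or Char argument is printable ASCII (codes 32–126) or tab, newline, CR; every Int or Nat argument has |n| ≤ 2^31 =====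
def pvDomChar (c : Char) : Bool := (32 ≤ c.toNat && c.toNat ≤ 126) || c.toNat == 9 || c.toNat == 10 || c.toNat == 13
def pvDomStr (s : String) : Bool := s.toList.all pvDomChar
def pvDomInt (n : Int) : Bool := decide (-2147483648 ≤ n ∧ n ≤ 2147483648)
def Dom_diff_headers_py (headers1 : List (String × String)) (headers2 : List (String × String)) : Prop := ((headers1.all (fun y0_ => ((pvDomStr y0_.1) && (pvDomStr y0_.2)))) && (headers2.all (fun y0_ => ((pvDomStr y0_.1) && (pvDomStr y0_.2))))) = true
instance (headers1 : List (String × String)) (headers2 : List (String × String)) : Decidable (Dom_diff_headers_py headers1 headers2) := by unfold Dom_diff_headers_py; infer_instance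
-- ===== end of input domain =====

-- B replaces A's pass over a materialized key-set union by two direct passes (over headers1
-- then over headers2's keys absent from headers1); same diff dict, no set built ("alternative").


-- ===== PORT A =====
def diff_headers_py (headers1 : List (String × String)) (headers2 : List (String × String)) : List (String × Option String × Option String) :=
  let d1 := PySem.Dict.mk headers1
  let d2 := PySem.Dict.mk headers2
  let allKeys : PySem.Set String :=
    PySem.Set.union (PySem.Set.ofList d1.keys) (PySem.Set.ofList d2.keys)
  (List.foldl
    (fun (diff : PySem.Dict String (Option String × Option String)) key =>
      let val1 := d1.get? key
      let val2 := d2.get? key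
      if val1 ≠ val2 then diff.insert key (val1, val2) else diff)
    PySem.Dict.empty allKeys).items

-- ===== PORT B =====
def diff_headers_py_alt (headers1 : List (String × String)) (headers2 : List (String × String)) : List (String × Option String × Option String) :=
  let d2 := PySem.Dict.mk headers2
  let diff1 := List.foldl
    (fun (diff : PySem.Dict String (Option String × Option String)) kv =>
      let v2 := d2.get? kv.1
      if v2 ≠ some kv.2 then diff.insert kv.1 (some kv.2, v2) else diff)
    PySem.Dict.empty headers1
  let d1 := PySem.Dict.mk headers1
  (List.foldl
    (fun (diff : PySem.Dict String (Option String × Option String)) kv =>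
      if d1.contains kv.1 then diff else diff.insert kv.1 (none, some kv.2))
    diff1 headers2).items

-- ===== PRECONDITION & SPEC =====
-- Pre_ requires each association list to have distinct keys: a Python dict never has duplicate
-- keys, so association lists with duplicates do not represent any input A accepts.
def Pre_diff_headers_py (headers1 : List (String × String)) (headers2 : List (String × String)) : Prop :=
  (headers1.map Prod.fst).Nodup ∧ (headers2.map Prod.fst).Nodup
instance (headers1 : List (String × String)) (headers2 : List (String × String)) : Decidable (Pre_diff_headers_py headers1 headers2) := by unfold Pre_diff_headers_py; infer_instance

def pvWitness_diff_headers_py : (List (String × String)) × (List (String × String)) :=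
  ([("a", "1"), ("b", "2")], [("a", "1"), ("c", "3")])

def Spec_diff_headers_py (headers1 : List (String × String)) (headers2 : List (String × String)) (out : List (String × Option String × Option String)) : Prop := out = diff_headers_py_alt headers1 headers2
instance (headers1 : List (String × String)) (headers2 : List (String × String)) (out : List (String × Option String × Option String)) : Decidable (Spec_diff_headers_py headers1 headers2 out) := by unfold Spec_diff_headers_py; infer_instance

-- ===== CLAIM (what is proved, stated in full; the proofs are below) =====
def Claim_equal_diff_headers_py : Prop := ∀ (headers1 : List (String × String)) (headers2 : List (String × String)), Dom_diff_headers_py headers1 headers2 → Pre_diff_headers_py headers1 headers2 → Spec_diff_headers_py headers1 headers2 (diff_headers_py headers1 headers2)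

-- ===== LEMMAS AND PROOFS =====

-- Loop shape shared by both ports: a fold that conditionally inserts at fresh, distinct keys
-- appends exactly the filtered, mapped pairs.  (The library's items_foldl_insert_fresh has no
-- conditional, so this variant is proved here.)
theorem items_foldl_ite_insert {κ ν β : Type} [BEq κ] [LawfulBEq κ]
    (p : β → Prop) [DecidablePred p] (k : β → κ) (v : β → ν) :
    ∀ (l : List β) (d : PySem.Dict κ ν),
      (∀ a ∈ l, p a → d.contains (k a) = false) →
      ((l.filter (fun a => decide (p a))).map k).Nodup →
      (List.foldl (fun d a => if p a then d.insert (k a) (v a) else d) d l).items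
        = d.items ++ (l.filter (fun a => decide (p a))).map (fun a => (k a, v a)) := by
  intro l
  induction l with
  | nil => intro d _ _; simp
  | cons a t ih =>
    intro d hfresh hnd
    by_cases hp : p a
    · have hfa : d.contains (k a) = false := hfresh a (by simp) hp
      have hstep : (List.foldl (fun d a => if p a then d.insert (k a) (v a) else d) d (a :: t))
          = List.foldl (fun d a => if p a then d.insert (k a) (v a) else d) (d.insert (k a) (v a)) t := by
        simp [hp]
      rw [hstep]
      have hnd' : ((a :: t).filter (fun a => decide (p a))).map k
          = k a :: (t.filter (fun a => decide (p a))).map k := by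
        simp [hp]
      rw [hnd'] at hnd
      have hka_notmem : k a ∉ (t.filter (fun a => decide (p a))).map k := (List.nodup_cons.mp hnd).1
      have hndT : ((t.filter (fun a => decide (p a))).map k).Nodup := (List.nodup_cons.mp hnd).2
      have hfresh' : ∀ b ∈ t, p b → (d.insert (k a) (v a)).contains (k b) = false := by
        intro b hb hpb
        have hne : k b ≠ k a := by
          intro he
          exact hka_notmem (he ▸ List.mem_map_of_mem (List.mem_filter.mpr ⟨hb, by simp [hpb]⟩))
        rw [PySem.Dict.contains_insert]
        simp [hne, hfresh b (by simp [hb]) hpb]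
      rw [ih (d.insert (k a) (v a)) hfresh' hndT,
          PySem.Dict.items_insert_of_not_contains _ _ hfa]
      simp [hp]
    · have hstep : (List.foldl (fun d a => if p a then d.insert (k a) (v a) else d) d (a :: t))
          = List.foldl (fun d a => if p a then d.insert (k a) (v a) else d) d t := by
        simp [hp]
      have hnd' : ((a :: t).filter (fun a => decide (p a))) = t.filter (fun a => decide (p a)) := by
        simp [hp]
      rw [hstep, ih d (fun b hb => hfresh b (by simp [hb])) (by rw [← hnd']; exact hnd)]
      rw [hnd']


theorem diff_headers_py_spec : Claim_equal_diff_headers_py := by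
  intro h1 h2 _ hpre
  obtain ⟨hn1, hn2⟩ := hpre
  unfold Spec_diff_headers_py diff_headers_py diff_headers_py_alt
  simp only []
  set d1 := PySem.Dict.mk h1 with hd1
  set d2 := PySem.Dict.mk h2 with hd2
  have hk1 : d1.keys = h1.map Prod.fst := rfl
  have hk2 : d2.keys = h2.map Prod.fst := rfl
  have hnk1 : d1.keys.Nodup := by rw [hk1]; exact hn1
  have hnk2 : d2.keys.Nodup := by rw [hk2]; exact hn2
  -- membership facts
  have hget1 : ∀ kv ∈ h1, d1.get? kv.1 = some kv.2 := by
    intro kv hkv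
    exact PySem.Dict.get?_of_mem_items d1 (by simpa [hd1] using hkv) hnk1
  have hget2 : ∀ kv ∈ h2, d2.get? kv.1 = some kv.2 := by
    intro kv hkv
    exact PySem.Dict.get?_of_mem_items d2 (by simpa [hd2] using hkv) hnk2
  have hnomem1 : ∀ y, y ∉ h1.map Prod.fst → d1.get? y = none := by
    intro y hy
    exact (PySem.Dict.get?_eq_none_iff_not_mem_keys d1 y).mpr (by rwa [hk1])
  have hcontains1 : ∀ y, d1.contains y = decide (y ∈ h1.map Prod.fst) := by
    intro y
    by_cases hy : y ∈ h1.map Prod.fst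
    · simp [hy, (PySem.Dict.contains_iff_mem_keys d1 y).mpr (by rwa [hk1])]
    · rw [decide_eq_false hy]
      by_cases hc : d1.contains y
      · exact absurd ((PySem.Dict.contains_iff_mem_keys d1 y).mp hc) (by rwa [hk1])
      · simpa using hc
  -- the union of key sets
  have hunion : PySem.Set.union (PySem.Set.ofList d1.keys) (PySem.Set.ofList d2.keys)
      = h1.map Prod.fst ++ (h2.map Prod.fst).filter
          (fun y => !(PySem.Set.contains (h1.map Prod.fst) y)) := by
    rw [hk1, hk2, PySem.Set.ofList_eq_self_of_nodup _ hn1, PySem.Set.ofList_eq_self_of_nodup _ hn2]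
    show PySem.Set.update (h1.map Prod.fst) (h2.map Prod.fst) = _
    rw [PySem.Set.update_eq_append_filter, PySem.Set.ofList_eq_self_of_nodup _ hn2]
  rw [hunion]
  -- abbreviations
  set K1 := h1.map Prod.fst with hK1
  set K2 := h2.map Prod.fst with hK2
  set E := K2.filter (fun y => !(PySem.Set.contains K1 y)) with hE
  -- E-side facts
  have hE_not_mem : ∀ y ∈ E, y ∉ K1 := by
    intro y hy
    have := (List.mem_filter.mp hy).2
    simpa [PySem.Set.contains_eq_listContains] using this
  have hndE : E.Nodup := List.Sublist.nodup List.filter_sublist hn2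
  have hndKE : (K1 ++ E).Nodup := by
    refine List.nodup_append.mpr ⟨hn1, hndE, ?_⟩
    intro a ha b hb hab
    exact hE_not_mem b hb (hab ▸ ha)
  -- LHS via the shared loop-shape lemma
  have LA : (List.foldl
      (fun (diff : PySem.Dict String (Option String × Option String)) key =>
        if d1.get? key ≠ d2.get? key then diff.insert key (d1.get? key, d2.get? key) else diff)
      PySem.Dict.empty (K1 ++ E)).items
      = ((K1 ++ E).filter (fun a => decide (d1.get? a ≠ d2.get? a))).map
          (fun a => (a, d1.get? a, d2.get? a)) := by
    simpa using items_foldl_ite_insert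
      (p := fun key => d1.get? key ≠ d2.get? key)
      (k := fun key => key)
      (v := fun key => (d1.get? key, d2.get? key))
      (K1 ++ E) PySem.Dict.empty
      (by intro a _ _; exact PySem.Dict.contains_empty a)
      (by
        have : ((K1 ++ E).filter (fun a => decide (d1.get? a ≠ d2.get? a))).Nodup :=
          List.Sublist.nodup List.filter_sublist hndKE
        simpa [List.map_id'] using this)
  rw [LA]
  -- RHS first loop
  set diff1 : PySem.Dict String (Option String × Option String) :=
    PySem.Dict.mk ((h1.filter (fun kv => decide (d2.get? kv.1 ≠ some kv.2))).map
      (fun kv => (kv.1, some kv.2, d2.get? kv.1))) with hdiff1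
  have hnd1f : ((h1.filter (fun kv => decide (d2.get? kv.1 ≠ some kv.2))).map (fun kv => kv.1)).Nodup :=
    List.Sublist.nodup (List.Sublist.map _ List.filter_sublist) hn1
  have hfold1 : List.foldl
      (fun (diff : PySem.Dict String (Option String × Option String)) kv =>
        if d2.get? kv.1 ≠ some kv.2 then diff.insert kv.1 (some kv.2, d2.get? kv.1) else diff)
      PySem.Dict.empty h1 = diff1 := by
    apply PySem.Dict.ext
    have LB1 := items_foldl_ite_insert
      (p := fun (kv : String × String) => d2.get? kv.1 ≠ some kv.2)
      (k := fun kv => kv.1)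
      (v := fun kv => ((some kv.2 : Option String), d2.get? kv.1))
      h1 PySem.Dict.empty
      (by intro a _ _; exact PySem.Dict.contains_empty a.1)
      hnd1f
    simpa [hdiff1] using LB1
  rw [hfold1]
  -- RHS second loop: flip the if, then apply the loop-shape lemma
  have hdiff1keys : ∀ y ∈ diff1.keys, y ∈ K1 := by
    intro y hy
    rw [hdiff1] at hy
    simp only [PySem.Dict.keys_mk, List.map_map, List.mem_map] at hy
    obtain ⟨kv, hkv, hkvy⟩ := hy
    exact hkvy ▸ List.mem_map_of_mem (List.mem_of_mem_filter hkv)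
  have hswap : (fun (diff : PySem.Dict String (Option String × Option String)) (kv : String × String) =>
        if d1.contains kv.1 then diff else diff.insert kv.1 ((none : Option String), some kv.2))
      = (fun (diff : PySem.Dict String (Option String × Option String)) (kv : String × String) =>
          if d1.contains kv.1 = false
          then diff.insert kv.1 ((none : Option String), some kv.2) else diff) := by
    funext diff kv
    by_cases hc : d1.contains kv.1 <;> simp [hc]
  rw [hswap]
  have LB2 : (List.foldl
      (fun (diff : PySem.Dict String (Option String × Option String)) kv =>
        if d1.contains kv.1 = false then diff.insert kv.1 ((none : Option String), some kv.2) else diff)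
      diff1 h2).items
      = diff1.items ++ (h2.filter (fun kv => decide (d1.contains kv.1 = false))).map
          (fun kv => (kv.1, (none : Option String), some kv.2)) := by
    simpa using items_foldl_ite_insert
      (p := fun (kv : String × String) => d1.contains kv.1 = false)
      (k := fun kv => kv.1)
      (v := fun kv => ((none : Option String), some kv.2))
      h2 diff1
      (by
        intro kv _ hp
        have hnot : kv.1 ∉ diff1.keys := by
          intro hmem
          have h1mem : kv.1 ∈ K1 := hdiff1keys _ hmem
          rw [hcontains1] at hp
          exact absurd h1mem (of_decide_eq_false hp)
        by_cases hc : diff1.contains kv.1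
        · exact absurd ((PySem.Dict.contains_iff_mem_keys diff1 kv.1).mp hc) hnot
        · simpa using hc)
      (List.Sublist.nodup (List.Sublist.map _ List.filter_sublist) hn2)
  rw [LB2]
  simp only [hdiff1]
  -- now both sides are explicit lists; split the LHS along the append
  rw [List.filter_append, List.map_append]
  congr 1
  · -- first segments agree
    rw [hK1, List.filter_map, List.map_map]
    refine Eq.trans (congrArg _ (List.filter_congr ?_)) (List.map_congr_left ?_)
    · intro kv hkv
      simp only [Function.comp]
      have hg := hget1 kv hkv
      by_cases h : d2.get? kv.1 = some kv.2
      · simp [hg, h]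
      · simp only [hg, decide_eq_decide]
        exact ⟨fun he h2 => he h2.symm, fun he h2 => he h2.symm⟩
    · intro kv hkv
      have hg := hget1 kv (List.mem_of_mem_filter hkv)
      simp [hg]
  · -- second segments agree
    have hEfilter : E.filter (fun a => decide (d1.get? a ≠ d2.get? a)) = E := by
      refine List.filter_eq_self.mpr ?_
      intro y hy
      have hy2 : y ∈ K2 := List.mem_of_mem_filter hy
      have hget1y : d1.get? y = none := hnomem1 y (hE_not_mem y hy)
      have hsome : (d2.get? y).isSome := by
        rw [← PySem.Dict.contains_eq_isSome_get?]
        exact (PySem.Dict.contains_iff_mem_keys d2 y).mpr (by rwa [hk2])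
      obtain ⟨v, hv⟩ := Option.isSome_iff_exists.mp hsome
      simp [hget1y, hv]
    rw [hEfilter, hE, hK2, List.filter_map, List.map_map]
    refine Eq.trans (congrArg _ (List.filter_congr ?_)) (List.map_congr_left ?_)
    · intro kv _
      simp only [Function.comp, PySem.Set.contains_eq_listContains, hcontains1]
      simp [hK1]
    · intro kv hkv
      have hmem : kv ∈ h2 := List.mem_of_mem_filter hkv
      have hcf : d1.contains kv.1 = false := by simpa using (List.mem_filter.mp hkv).2
      have hnot : kv.1 ∉ K1 := of_decide_eq_false ((hcontains1 kv.1).symm.trans hcf)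
      simp [hnomem1 kv.1 (by simpa [hK1] using hnot), hget2 kv hmem]
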